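-- pv_equiv track=rewrite | github.com/amargauge26/leetcode_solve | min_heap.py | minHeap
-- ===== SOURCE A (Python) =====
-- import heapq
--
-- def minHeap(N: int, Q: [[]]) -> []:
--     heap = []
--     res = []
--
--
--     for q in Q:
--         if q[0]==0:
--             heapq.heappush(heap,q[1])
--
--         elif q[0]==1:
--             if heap:
--                 res.append(heapq.heappop(heap))
--
--
--     return res
-- ===== SOURCE B (Python) =====
-- def minHeap(N: int, Q: [[]]) -> []:
--     arr = []   # kept sorted ascending at all times
--     res = []
--     for q in Q:
--         if q[0] == 0:
--             x = q[1]
--             # ordered insertion: skip elements strictly smaller, insert before first >= x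
--             i = 0
--             while i < len(arr) and arr[i] < x:
--                 i += 1
--             arr.insert(i, x)
--         elif q[0] == 1:
--             if arr:
--                 res.append(arr.pop(0))
--     return res
-- ===== Notes on version B (the rewrite author's own statement) =====
-- stated objective: alternative
-- what changed: Replaces the binary heap (heapq sift-up/sift-down) with a plain list kept in ascending order by linear ordered insertion; a pop takes the front element instead of running heappop's sift-down.
import Mathlib
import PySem

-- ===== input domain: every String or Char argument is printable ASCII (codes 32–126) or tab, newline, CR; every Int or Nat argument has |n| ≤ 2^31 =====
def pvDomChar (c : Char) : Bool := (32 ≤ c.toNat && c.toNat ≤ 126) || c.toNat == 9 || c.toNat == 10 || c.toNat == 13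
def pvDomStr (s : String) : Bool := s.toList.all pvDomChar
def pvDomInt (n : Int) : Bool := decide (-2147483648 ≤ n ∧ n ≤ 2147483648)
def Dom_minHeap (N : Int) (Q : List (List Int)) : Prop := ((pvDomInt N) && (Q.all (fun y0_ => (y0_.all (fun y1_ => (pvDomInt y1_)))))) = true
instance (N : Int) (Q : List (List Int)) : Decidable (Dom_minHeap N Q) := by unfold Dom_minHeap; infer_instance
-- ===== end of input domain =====

-- B replaces the heapq binary heap with a list kept in ascending order (linear ordered
-- insertion, pop from the front); an alternative data structure, not claimed faster.

-- ===== PORT A =====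
-- Transliteration of CPython's heapq._siftdown: bubble newitem up from `pos` towards
-- `startpos`, shifting larger parents down.  List indexing is via getD 0; Pre_minHeap
-- guarantees the indices the Python code reads are in range, so the default is never used.
def siftdownLoop (heap : List Int) (newitem : Int) (startpos pos : Nat) : List Int :=
  if _h : startpos < pos then
    if newitem < heap.getD ((pos - 1) / 2) 0 then
      siftdownLoop (heap.set pos (heap.getD ((pos - 1) / 2) 0)) newitem startpos ((pos - 1) / 2)
    else heap.set pos newitem
  else heap.set pos newitem
termination_by pos
decreasing_by omega

def pySiftdown (heap : List Int) (startpos pos : Nat) : List Int :=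
  siftdownLoop heap (heap.getD pos 0) startpos pos

-- Transliteration of CPython's heapq._siftup: move the hole at `pos` down to a leaf,
-- always following the smaller child; returns the final contents and hole position.
def siftupLoop (heap : List Int) (pos : Nat) : List Int × Nat :=
  if _h : 2 * pos + 1 < heap.length then
    if 2 * pos + 1 + 1 < heap.length ∧ ¬ (heap.getD (2 * pos + 1) 0 < heap.getD (2 * pos + 1 + 1) 0)
    then siftupLoop (heap.set pos (heap.getD (2 * pos + 1 + 1) 0)) (2 * pos + 1 + 1)
    else siftupLoop (heap.set pos (heap.getD (2 * pos + 1) 0)) (2 * pos + 1)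
  else (heap, pos)
termination_by heap.length - pos
decreasing_by all_goals (simp only [List.length_set]; omega)

def pySiftup (heap : List Int) (pos : Nat) : List Int :=
  pySiftdown ((siftupLoop heap pos).1.set (siftupLoop heap pos).2 (heap.getD pos 0))
    pos (siftupLoop heap pos).2

def pyHeappush (heap : List Int) (item : Int) : List Int :=
  pySiftdown (heap ++ [item]) 0 heap.length

-- heapq.heappop; A only calls it under `if heap:`, so heap ≠ [] at every call
def pyHeappop (heap : List Int) : Int × List Int :=
  if (heap.dropLast).isEmpty then (heap.getLastD 0, [])
  else ((heap.dropLast).getD 0 0, pySiftup ((heap.dropLast).set 0 (heap.getLastD 0)) 0)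

def stepA (st : List Int × List Int) (q : List Int) : List Int × List Int :=
  if q.getD 0 0 = 0 then (pyHeappush st.1 (q.getD 1 0), st.2)
  else if q.getD 0 0 = 1 then
    if st.1.isEmpty then st
    else ((pyHeappop st.1).2, st.2 ++ [(pyHeappop st.1).1])
  else st

def minHeap (N : Int) (Q : List (List Int)) : List Int :=
  (Q.foldl stepA ([], [])).2

-- ===== PORT B =====
-- Source B's while-loop insertion (skip elements < x, insert before the first ≥ x) is exactly
-- List.orderedInsert (· ≤ ·); pop(0) is head/tail.
def stepB (st : List Int × List Int) (q : List Int) : List Int × List Int :=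
  if q.getD 0 0 = 0 then (st.1.orderedInsert (· ≤ ·) (q.getD 1 0), st.2)
  else if q.getD 0 0 = 1 then
    match st.1 with
    | [] => st
    | a :: rest => (rest, st.2 ++ [a])
  else st

def minHeap_alt (N : Int) (Q : List (List Int)) : List Int :=
  (Q.foldl stepB ([], [])).2

-- ===== PRECONDITION & SPEC =====
-- Pre_ excludes exactly the queries on which the Python A raises IndexError:
-- an empty query (q[0]) or a push query without a second element (q[1]).
def Pre_minHeap (N : Int) (Q : List (List Int)) : Prop :=
  ∀ q ∈ Q, q ≠ [] ∧ (q.headD 0 = 0 → 2 ≤ q.length)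
instance (N : Int) (Q : List (List Int)) : Decidable (Pre_minHeap N Q) := by
  unfold Pre_minHeap; infer_instance

def pvWitness_minHeap : Int × List (List Int) :=
  (4, [[0, 5], [0, 2], [1], [0, 7], [1], [1], [1], [2, 9]])

def Spec_minHeap (N : Int) (Q : List (List Int)) (out : List Int) : Prop := out = minHeap_alt N Q
instance (N : Int) (Q : List (List Int)) (out : List Int) : Decidable (Spec_minHeap N Q out) := by
  unfold Spec_minHeap; infer_instance

-- ===== CLAIM (what is proved, stated in full; the proofs are below) =====
def Claim_equal_minHeap : Prop := ∀ (N : Int) (Q : List (List Int)), Dom_minHeap N Q → Pre_minHeap N Q → Spec_minHeap N Q (minHeap N Q)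

-- ===== LEMMAS AND PROOFS =====

-- min-heap property of the array representation (parent of i is (i-1)/2)
def IsHeap (l : List Int) : Prop :=
  ∀ i : Nat, 0 < i → i < l.length → l.getD ((i - 1) / 2) 0 ≤ l.getD i 0

theorem gset_eq (l : List Int) (i : Nat) (x : Int) (h : i < l.length) :
    (l.set i x).getD i 0 = x := by
  simp [List.getD, h]

theorem gset_ne (l : List Int) (i j : Nat) (x : Int) (h : i ≠ j) :
    (l.set i x).getD j 0 = l.getD j 0 := by
  simp [List.getD, List.getElem?_set_ne h]

theorem getD_mem (l : List Int) (i : Nat) (h : i < l.length) : l.getD i 0 ∈ l := by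
  rw [List.getD_eq_getElem l 0 h]; exact List.getElem_mem h

theorem count_set (l : List Int) (i : Nat) (x y : Int) (h : i < l.length) :
    (l.set i x).count y + (if l.getD i 0 = y then 1 else 0)
      = l.count y + (if x = y then 1 else 0) := by
  rw [List.set_eq_take_cons_drop x h]
  conv_rhs => rw [← List.take_append_drop i l, ← List.getElem_cons_drop h]
  rw [List.getD_eq_getElem l 0 h]
  simp only [List.count_append, List.count_cons]
  split <;> split <;> simp_all <;> omega

theorem set_set_perm (l : List Int) (i j : Nat) (x : Int)
    (hi : i < l.length) (hj : j < l.length) (hij : i ≠ j) :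
    ((l.set i (l.getD j 0)).set j x).Perm (l.set i x) := by
  apply List.perm_iff_count.mpr
  intro y
  have h3 := count_set l i x y hi
  have h4 := count_set (l.set i (l.getD j 0)) j x y (by simpa using hj)
  have h2 := count_set l i (l.getD j 0) y hi
  rw [gset_ne l i j _ hij] at h4
  split_ifs at h2 h3 h4 <;> omega

-- bubble-up correctness: the three-part invariant of siftdownLoop (startpos = 0)
theorem siftdownLoop_spec (pos : Nat) : ∀ (heap : List Int) (newitem : Int),
    pos < heap.length →
    (∀ i, 0 < i → i < heap.length → i ≠ pos → (i - 1) / 2 ≠ pos →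
        heap.getD ((i - 1) / 2) 0 ≤ heap.getD i 0) →
    (∀ i, 0 < i → i < heap.length → (i - 1) / 2 = pos → newitem ≤ heap.getD i 0) →
    (∀ i, 0 < i → i < heap.length → (i - 1) / 2 = pos → 0 < pos →
        heap.getD ((pos - 1) / 2) 0 ≤ heap.getD i 0) →
    IsHeap (siftdownLoop heap newitem 0 pos)
      ∧ (siftdownLoop heap newitem 0 pos).Perm (heap.set pos newitem)
      ∧ (siftdownLoop heap newitem 0 pos).length = heap.length := by
  induction pos using Nat.strong_induction_on with
  | _ pos IH =>
    intro heap newitem hlen inv1 inv2 inv3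
    rw [siftdownLoop]
    by_cases hp : 0 < pos
    · rw [dif_pos hp]
      have hpplt : (pos - 1) / 2 < pos := by omega
      have hpplen : (pos - 1) / 2 < heap.length := lt_trans hpplt hlen
      by_cases hlt : newitem < heap.getD ((pos - 1) / 2) 0
      · rw [if_pos hlt]
        set pp := (pos - 1) / 2 with hpp
        set heap' := heap.set pos (heap.getD pp 0) with hheap'
        have hlen' : heap'.length = heap.length := by simp [hheap']
        have r1 : ∀ i, 0 < i → i < heap'.length → i ≠ pp → (i - 1) / 2 ≠ pp →
            heap'.getD ((i - 1) / 2) 0 ≤ heap'.getD i 0 := by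
          intro i hi0 hil hne hpar
          rw [hlen'] at hil
          by_cases hipos : i = pos
          · subst hipos
            exact absurd hpp.symm hpar
          · by_cases hpari : (i - 1) / 2 = pos
            · have hiv : heap'.getD i 0 = heap.getD i 0 := gset_ne _ _ _ _ (Ne.symm hipos)
              have hpv : heap'.getD ((i - 1) / 2) 0 = heap.getD pp 0 := by
                rw [hpari]; exact gset_eq _ _ _ hlen
              rw [hiv, hpv]
              exact inv3 i hi0 hil hpari hp
            · rw [gset_ne _ _ _ _ (Ne.symm hipos), gset_ne _ _ _ _ (Ne.symm hpari)]
              exact inv1 i hi0 hil hipos hpari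
        have r2 : ∀ i, 0 < i → i < heap'.length → (i - 1) / 2 = pp →
            newitem ≤ heap'.getD i 0 := by
          intro i hi0 hil hpar
          rw [hlen'] at hil
          by_cases hipos : i = pos
          · subst hipos
            rw [gset_eq _ _ _ hlen]; exact le_of_lt hlt
          · rw [gset_ne _ _ _ _ (Ne.symm hipos)]
            have hle : heap.getD pp 0 ≤ heap.getD i 0 := by
              rw [← hpar]
              exact inv1 i hi0 hil hipos (by omega)
            exact le_of_lt (lt_of_lt_of_le hlt hle)
        have r3 : ∀ i, 0 < i → i < heap'.length → (i - 1) / 2 = pp → 0 < pp →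
            heap'.getD ((pp - 1) / 2) 0 ≤ heap'.getD i 0 := by
          intro i hi0 hil hpar hpp0
          rw [hlen'] at hil
          have hgp : (pp - 1) / 2 ≠ pos := by omega
          have hgpv : heap'.getD ((pp - 1) / 2) 0 = heap.getD ((pp - 1) / 2) 0 :=
            gset_ne _ _ _ _ (Ne.symm hgp)
          have hppair : heap.getD ((pp - 1) / 2) 0 ≤ heap.getD pp 0 :=
            inv1 pp hpp0 hpplen (by omega) (by omega)
          by_cases hipos : i = pos
          · subst hipos
            rw [hgpv, gset_eq _ _ _ hlen]; exact hppair
          · rw [hgpv, gset_ne _ _ _ _ (Ne.symm hipos)]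
            have hle : heap.getD pp 0 ≤ heap.getD i 0 := by
              rw [← hpar]
              exact inv1 i hi0 hil hipos (by omega)
            exact le_trans hppair hle
        obtain ⟨ih1, ih2, ih3⟩ := IH pp hpplt heap' newitem (by omega) r1 r2 r3
        refine ⟨ih1, ?_, by omega⟩
        exact ih2.trans (set_set_perm heap pos pp newitem hlen hpplen (by omega))
      · rw [if_neg hlt]
        refine ⟨?_, List.Perm.refl _, by simp⟩
        intro i hi0 hil
        rw [List.length_set] at hil
        by_cases hipos : i = pos
        · subst hipos
          rw [gset_eq _ _ _ hlen, gset_ne _ _ _ _ (by omega : i ≠ (i - 1) / 2)]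
          exact le_of_not_gt hlt
        · by_cases hpari : (i - 1) / 2 = pos
          · rw [gset_ne _ _ _ _ (Ne.symm hipos), hpari, gset_eq _ _ _ hlen]
            exact inv2 i hi0 hil hpari
          · rw [gset_ne _ _ _ _ (Ne.symm hipos), gset_ne _ _ _ _ (Ne.symm hpari)]
            exact inv1 i hi0 hil hipos hpari
    · rw [dif_neg hp]
      have hpos0 : pos = 0 := by omega
      subst hpos0
      refine ⟨?_, List.Perm.refl _, by simp⟩
      intro i hi0 hil
      rw [List.length_set] at hil
      by_cases hpari : (i - 1) / 2 = 0
      · rw [gset_ne _ _ _ _ (by omega : (0:Nat) ≠ i), hpari, gset_eq _ _ _ hlen]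
        exact inv2 i hi0 hil hpari
      · rw [gset_ne _ _ _ _ (by omega : (0:Nat) ≠ i), gset_ne _ _ _ _ (Ne.symm hpari)]
        exact inv1 i hi0 hil (by omega) hpari

-- hole-down phase: siftupLoop preserves the partial invariant and ends at a leaf
theorem siftupLoop_spec : ∀ (n : Nat) (heap : List Int) (pos : Nat), heap.length - pos = n →
    pos < heap.length →
    (∀ i, 0 < i → i < heap.length → i ≠ pos → (i - 1) / 2 ≠ pos →
        heap.getD ((i - 1) / 2) 0 ≤ heap.getD i 0) →
    (∀ i, 0 < i → i < heap.length → (i - 1) / 2 = pos → 0 < pos →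
        heap.getD ((pos - 1) / 2) 0 ≤ heap.getD i 0) →
    (siftupLoop heap pos).1.length = heap.length
      ∧ (siftupLoop heap pos).2 < heap.length
      ∧ heap.length ≤ 2 * (siftupLoop heap pos).2 + 1
      ∧ (∀ x, ((siftupLoop heap pos).1.set (siftupLoop heap pos).2 x).Perm (heap.set pos x))
      ∧ (∀ i, 0 < i → i < heap.length → i ≠ (siftupLoop heap pos).2 →
          (i - 1) / 2 ≠ (siftupLoop heap pos).2 →
          (siftupLoop heap pos).1.getD ((i - 1) / 2) 0 ≤ (siftupLoop heap pos).1.getD i 0)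
      ∧ (∀ i, 0 < i → i < heap.length → (i - 1) / 2 = (siftupLoop heap pos).2 →
          0 < (siftupLoop heap pos).2 →
          (siftupLoop heap pos).1.getD (((siftupLoop heap pos).2 - 1) / 2) 0
            ≤ (siftupLoop heap pos).1.getD i 0) := by
  intro n
  induction n using Nat.strong_induction_on with
  | _ n IH =>
    intro heap pos hn hlen inv1 inv3
    rw [siftupLoop]
    by_cases hc : 2 * pos + 1 < heap.length
    · rw [dif_pos hc]
      by_cases hguard : 2 * pos + 1 + 1 < heap.length ∧
          ¬ (heap.getD (2 * pos + 1) 0 < heap.getD (2 * pos + 1 + 1) 0)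
      case pos =>
        rw [if_pos hguard]
        have hcplen : 2 * pos + 1 + 1 < heap.length := hguard.1
        have hcpmin : ∀ j, 0 < j → j < heap.length → (j - 1) / 2 = pos →
            heap.getD (2 * pos + 1 + 1) 0 ≤ heap.getD j 0 := by
          intro j hj0 hjl hjpar
          have : j = 2 * pos + 1 ∨ j = 2 * pos + 1 + 1 := by omega
          rcases this with hj | hj
          · rw [hj]; exact le_of_not_gt hguard.2
          · rw [hj]
        set cp := 2 * pos + 1 + 1 with hcp
        set heap' := heap.set pos (heap.getD cp 0) with hheap'
        have hlen' : heap'.length = heap.length := by simp [hheap']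
        have r1 : ∀ i, 0 < i → i < heap'.length → i ≠ cp → (i - 1) / 2 ≠ cp →
            heap'.getD ((i - 1) / 2) 0 ≤ heap'.getD i 0 := by
          intro i hi0 hil hne hpar
          rw [hlen'] at hil
          by_cases hipos : i = pos
          · subst hipos
            rw [gset_eq _ _ _ hlen, gset_ne _ _ _ _ (by omega : i ≠ (i - 1) / 2)]
            exact inv3 cp (by omega) hcplen (by omega) hi0
          · by_cases hpari : (i - 1) / 2 = pos
            · rw [gset_ne _ _ _ _ (Ne.symm hipos), hpari, gset_eq _ _ _ hlen]
              exact hcpmin i hi0 hil hpari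
            · rw [gset_ne _ _ _ _ (Ne.symm hipos), gset_ne _ _ _ _ (Ne.symm hpari)]
              exact inv1 i hi0 hil hipos hpari
        have r3 : ∀ i, 0 < i → i < heap'.length → (i - 1) / 2 = cp → 0 < cp →
            heap'.getD ((cp - 1) / 2) 0 ≤ heap'.getD i 0 := by
          intro i hi0 hil hpar _
          rw [hlen'] at hil
          have hine : i ≠ pos := by omega
          rw [(by omega : (cp - 1) / 2 = pos), gset_eq _ _ _ hlen,
            gset_ne _ _ _ _ (Ne.symm hine)]
          have hgoal := inv1 i hi0 hil hine (by omega)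
          rwa [hpar] at hgoal
        obtain ⟨ih1, ih2, ih3, ih4, ih5, ih6⟩ :=
          IH (heap'.length - cp) (by rw [hlen']; omega) heap' cp rfl (by omega) r1 r3
        rw [hlen'] at ih1 ih2 ih3 ih5 ih6
        refine ⟨ih1, ih2, ih3, ?_, ih5, ih6⟩
        intro x
        exact (ih4 x).trans (set_set_perm heap pos cp x hlen (by omega) (by omega))
      case neg =>
        rw [if_neg hguard]
        have hcpmin : ∀ j, 0 < j → j < heap.length → (j - 1) / 2 = pos →
            heap.getD (2 * pos + 1) 0 ≤ heap.getD j 0 := by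
          intro j hj0 hjl hjpar
          have : j = 2 * pos + 1 ∨ j = 2 * pos + 1 + 1 := by omega
          rcases this with hj | hj
          · rw [hj]
          · rw [hj]
            have hlt : heap.getD (2 * pos + 1) 0 < heap.getD (2 * pos + 1 + 1) 0 := by
              by_contra hnot
              exact hguard ⟨by omega, hnot⟩
            exact le_of_lt hlt
        set cp := 2 * pos + 1 with hcp
        set heap' := heap.set pos (heap.getD cp 0) with hheap'
        have hlen' : heap'.length = heap.length := by simp [hheap']
        have r1 : ∀ i, 0 < i → i < heap'.length → i ≠ cp → (i - 1) / 2 ≠ cp →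
            heap'.getD ((i - 1) / 2) 0 ≤ heap'.getD i 0 := by
          intro i hi0 hil hne hpar
          rw [hlen'] at hil
          by_cases hipos : i = pos
          · subst hipos
            rw [gset_eq _ _ _ hlen, gset_ne _ _ _ _ (by omega : i ≠ (i - 1) / 2)]
            exact inv3 cp (by omega) hc (by omega) hi0
          · by_cases hpari : (i - 1) / 2 = pos
            · rw [gset_ne _ _ _ _ (Ne.symm hipos), hpari, gset_eq _ _ _ hlen]
              exact hcpmin i hi0 hil hpari
            · rw [gset_ne _ _ _ _ (Ne.symm hipos), gset_ne _ _ _ _ (Ne.symm hpari)]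
              exact inv1 i hi0 hil hipos hpari
        have r3 : ∀ i, 0 < i → i < heap'.length → (i - 1) / 2 = cp → 0 < cp →
            heap'.getD ((cp - 1) / 2) 0 ≤ heap'.getD i 0 := by
          intro i hi0 hil hpar _
          rw [hlen'] at hil
          have hine : i ≠ pos := by omega
          rw [(by omega : (cp - 1) / 2 = pos), gset_eq _ _ _ hlen,
            gset_ne _ _ _ _ (Ne.symm hine)]
          have hgoal := inv1 i hi0 hil hine (by omega)
          rwa [hpar] at hgoal
        obtain ⟨ih1, ih2, ih3, ih4, ih5, ih6⟩ :=
          IH (heap'.length - cp) (by rw [hlen']; omega) heap' cp rfl (by omega) r1 r3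
        rw [hlen'] at ih1 ih2 ih3 ih5 ih6
        refine ⟨ih1, ih2, ih3, ?_, ih5, ih6⟩
        intro x
        exact (ih4 x).trans (set_set_perm heap pos cp x hlen (by omega) (by omega))
    · rw [dif_neg hc]
      exact ⟨rfl, hlen, by omega, fun x => List.Perm.refl _, inv1, inv3⟩

theorem heap_min (heap : List Int) (hh : IsHeap heap) :
    ∀ i, i < heap.length → heap.getD 0 0 ≤ heap.getD i 0 := by
  intro i
  induction i using Nat.strong_induction_on with
  | _ i IH =>
    intro hil
    by_cases hi0 : i = 0
    · subst hi0; exact le_refl _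
    · exact le_trans (IH _ (by omega) (by omega)) (hh i (by omega) hil)

theorem heap_min_mem (heap : List Int) (hh : IsHeap heap) (y : Int) (hy : y ∈ heap) :
    heap.getD 0 0 ≤ y := by
  obtain ⟨i, hi, rfl⟩ := List.mem_iff_getElem.mp hy
  rw [← List.getD_eq_getElem heap 0 hi]
  exact heap_min heap hh i hi

theorem pyHeappush_spec (heap : List Int) (x : Int) (hh : IsHeap heap) :
    IsHeap (pyHeappush heap x) ∧ (pyHeappush heap x).Perm (x :: heap) := by
  have hlen : heap.length < (heap ++ [x]).length := by simp
  have hxg : (heap ++ [x])[heap.length]'(by simp) = x := by simp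
  have hx : (heap ++ [x]).getD heap.length 0 = x := by
    rw [List.getD_eq_getElem _ 0 (by simp)]; exact hxg
  have inv1 : ∀ i, 0 < i → i < (heap ++ [x]).length → i ≠ heap.length →
      (i - 1) / 2 ≠ heap.length →
      (heap ++ [x]).getD ((i - 1) / 2) 0 ≤ (heap ++ [x]).getD i 0 := by
    intro i hi0 hil hne _
    rw [List.length_append, List.length_cons, List.length_nil] at hil
    have hil' : i < heap.length := by omega
    have e1 : (heap ++ [x]).getD i 0 = heap.getD i 0 := by
      simp [List.getD, List.getElem?_append_left hil']
    have e2 : (heap ++ [x]).getD ((i - 1) / 2) 0 = heap.getD ((i - 1) / 2) 0 := by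
      simp [List.getD, List.getElem?_append_left (by omega : (i - 1) / 2 < heap.length)]
    rw [e1, e2]
    exact hh i hi0 hil'
  have inv2 : ∀ i, 0 < i → i < (heap ++ [x]).length → (i - 1) / 2 = heap.length →
      x ≤ (heap ++ [x]).getD i 0 := by
    intro i _ hil hpar
    rw [List.length_append, List.length_cons, List.length_nil] at hil
    omega
  have inv3 : ∀ i, 0 < i → i < (heap ++ [x]).length → (i - 1) / 2 = heap.length →
      0 < heap.length →
      (heap ++ [x]).getD ((heap.length - 1) / 2) 0 ≤ (heap ++ [x]).getD i 0 := by
    intro i _ hil hpar _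
    rw [List.length_append, List.length_cons, List.length_nil] at hil
    omega
  unfold pyHeappush pySiftdown
  rw [hx]
  obtain ⟨h1, h2, _⟩ := siftdownLoop_spec heap.length (heap ++ [x]) x hlen inv1 inv2 inv3
  refine ⟨h1, h2.trans ?_⟩
  have hset : (heap ++ [x]).set heap.length x = heap ++ [x] := by
    have hs := List.set_getElem_self hlen
    rw [hxg] at hs
    exact hs
  rw [hset]
  exact List.perm_append_singleton x heap

theorem dropLast_getD (heap : List Int) (j : Nat) (hj : j < heap.dropLast.length) :
    heap.dropLast.getD j 0 = heap.getD j 0 := by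
  have hj2 : j < heap.length := by
    have := heap.length_dropLast
    omega
  rw [List.getD_eq_getElem _ 0 hj, List.getD_eq_getElem _ 0 hj2]
  exact List.getElem_dropLast _

theorem pyHeappop_spec (heap : List Int) (hh : IsHeap heap) (hne : heap ≠ []) :
    IsHeap (pyHeappop heap).2
      ∧ ((pyHeappop heap).1 :: (pyHeappop heap).2).Perm heap
      ∧ (pyHeappop heap).1 = heap.getD 0 0 := by
  have hdecomp : heap.dropLast ++ [heap.getLast hne] = heap := List.dropLast_append_getLast hne
  have hlastD : heap.getLastD 0 = heap.getLast hne := by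
    cases heap with
    | nil => exact absurd rfl hne
    | cons a t => rfl
  unfold pyHeappop
  by_cases hemp : (heap.dropLast).isEmpty
  · rw [if_pos hemp]
    have h1 : heap.dropLast = [] := List.isEmpty_iff.mp hemp
    rw [h1] at hdecomp
    have hsing : heap = [heap.getLast hne] := hdecomp.symm
    refine ⟨by intro i hi0 hil; simp at hil, ?_, ?_⟩
    · conv_rhs => rw [hsing]
      rw [hlastD]
    · simp only [hlastD]
      conv_rhs => rw [hsing]
      rfl
  · rw [if_neg hemp]
    have hrne : heap.dropLast ≠ [] := by
      intro h; rw [h] at hemp; exact hemp rfl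
    have hrlen : 0 < heap.dropLast.length := List.length_pos_iff.mpr hrne
    set last := heap.getLastD 0 with hlast
    set L := heap.dropLast.set 0 last with hL
    have hLlen : L.length = heap.dropLast.length := by simp [hL]
    have hLd : ∀ j, 0 < j → j < L.length → L.getD j 0 = heap.getD j 0 := by
      intro j hj0 hjl
      rw [hL, gset_ne _ _ _ _ (by omega : (0:Nat) ≠ j), dropLast_getD heap j (by omega)]
    have inv1 : ∀ i, 0 < i → i < L.length → i ≠ 0 → (i - 1) / 2 ≠ 0 →
        L.getD ((i - 1) / 2) 0 ≤ L.getD i 0 := by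
      intro i hi0 hil _ hpar
      rw [hLd i hi0 hil, hLd ((i - 1) / 2) (by omega) (by omega)]
      have : i < heap.length := by
        have := hLlen ▸ hil
        simp at this ⊢
        omega
      exact hh i hi0 this
    have inv3 : ∀ i, 0 < i → i < L.length → (i - 1) / 2 = 0 → 0 < (0:Nat) →
        L.getD ((0 - 1) / 2) 0 ≤ L.getD i 0 := by
      intro i _ _ _ h
      exact absurd h (lt_irrefl 0)
    have hL0 : 0 < L.length := by omega
    obtain ⟨s1, s2, s3, s4, s5, s6⟩ :=
      siftupLoop_spec L.length L 0 (by omega) hL0 inv1 inv3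
    set h1 := (siftupLoop L 0).1 with hh1
    set p := (siftupLoop L 0).2 with hp
    have hni : L.getD 0 0 = last := by
      rw [hL]; exact gset_eq _ _ _ hrlen
    -- bubble-up from the leaf p
    have hset : (h1.set p (L.getD 0 0)).length = L.length := by simp [s1]
    have binv1 : ∀ i, 0 < i → i < (h1.set p (L.getD 0 0)).length → i ≠ p →
        (i - 1) / 2 ≠ p →
        (h1.set p (L.getD 0 0)).getD ((i - 1) / 2) 0 ≤ (h1.set p (L.getD 0 0)).getD i 0 := by
      intro i hi0 hil hne hpar
      rw [gset_ne _ _ _ _ (Ne.symm hne), gset_ne _ _ _ _ (Ne.symm hpar)]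
      rw [hset] at hil
      exact s5 i hi0 hil hne hpar
    have binv2 : ∀ i, 0 < i → i < (h1.set p (L.getD 0 0)).length → (i - 1) / 2 = p →
        L.getD 0 0 ≤ (h1.set p (L.getD 0 0)).getD i 0 := by
      intro i hi0 hil hpar
      rw [hset] at hil
      omega
    have binv3 : ∀ i, 0 < i → i < (h1.set p (L.getD 0 0)).length → (i - 1) / 2 = p →
        0 < p →
        (h1.set p (L.getD 0 0)).getD ((p - 1) / 2) 0 ≤ (h1.set p (L.getD 0 0)).getD i 0 := by
      intro i hi0 hil hpar _
      rw [hset] at hil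
      omega
    unfold pySiftup pySiftdown
    rw [← hh1, ← hp]
    have hplt : p < (h1.set p (L.getD 0 0)).length := by rw [hset]; omega
    have hread : (h1.set p (L.getD 0 0)).getD p 0 = L.getD 0 0 := by
      exact gset_eq _ _ _ (by rw [s1]; omega)
    rw [hread]
    obtain ⟨b1, b2, _⟩ :=
      siftdownLoop_spec p (h1.set p (L.getD 0 0)) (L.getD 0 0) hplt binv1 binv2 binv3
    refine ⟨b1, ?_, ?_⟩
    · -- perm: result ~ L, then v :: L ~ heap
      have e1 : (h1.set p (L.getD 0 0)).set p (L.getD 0 0) = h1.set p (L.getD 0 0) := by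
        rw [List.set_set]
      have hresL : (siftdownLoop (h1.set p (L.getD 0 0)) (L.getD 0 0) 0 p).Perm L := by
        refine b2.trans ?_
        rw [e1]
        refine (s4 (L.getD 0 0)).trans ?_
        rw [hni, hL, List.set_set]
      -- heap.dropLast = d0 :: dt ; L = last :: dt ; heap = (d0 :: dt) ++ [getLast]
      obtain ⟨d0, dt, hd⟩ := List.exists_cons_of_ne_nil hrne
      have hd0 : heap.dropLast.getD 0 0 = d0 := by rw [hd]; rfl
      have hLform : L = last :: dt := by rw [hL, hd]; rfl
      refine (List.Perm.cons _ hresL).trans ?_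
      rw [hd0, hLform]
      have hform : heap = (d0 :: dt) ++ [heap.getLast hne] := by
        rw [← hd]; exact hdecomp.symm
      rw [hform, ← hlastD]
      exact ((List.perm_append_singleton last dt).symm).cons d0
    · rw [dropLast_getD heap 0 hrlen]
theorem fold_rel : ∀ (Q : List (List Int)) (heap arr res : List Int),
    heap.Perm arr → List.Pairwise (· ≤ ·) arr → IsHeap heap →
    (Q.foldl stepA (heap, res)).2 = (Q.foldl stepB (arr, res)).2 := by
  intro Q
  induction Q with
  | nil => intro heap arr res _ _ _; rfl
  | cons q Q ih =>
    intro heap arr res hperm hsort hheap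
    simp only [List.foldl_cons]
    by_cases h0 : q.getD 0 0 = 0
    · rw [stepA, stepB, if_pos h0, if_pos h0]
      obtain ⟨hH, hP⟩ := pyHeappush_spec heap (q.getD 1 0) hheap
      refine ih _ _ _ ?_ ?_ hH
      · exact hP.trans ((hperm.cons _).trans (List.perm_orderedInsert _ _ _).symm)
      · exact List.Pairwise.orderedInsert _ _ hsort
    · by_cases h1 : q.getD 0 0 = 1
      · rw [stepA, stepB, if_neg h0, if_neg h0, if_pos h1, if_pos h1]
        cases harr : arr with
        | nil =>
          have hheapnil : heap = [] := by
            have := hperm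
            rw [harr] at this
            exact this.eq_nil
          rw [hheapnil]
          simp only [List.isEmpty_nil, if_pos]
          exact ih [] [] res (List.Perm.refl _) List.Pairwise.nil
            (by intro i hi hl; simp at hl)
        | cons a t =>
          have hhne : heap ≠ [] := by
            intro h
            rw [h, harr] at hperm
            exact List.cons_ne_nil a t hperm.symm.eq_nil
          have hemp : heap.isEmpty = false := by
            cases heap with
            | nil => exact absurd rfl hhne
            | cons _ _ => rfl
          rw [hemp]
          simp only [Bool.false_eq_true, if_false]
          obtain ⟨pH, pP, pV⟩ := pyHeappop_spec heap hheap hhne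
          have hva : (pyHeappop heap).1 = a := by
            rw [pV]
            have h1a : heap.getD 0 0 ≤ a := by
              apply heap_min_mem heap hheap
              rw [hperm.mem_iff, harr]
              exact List.mem_cons_self
            have h2a : a ≤ heap.getD 0 0 := by
              have hmem : heap.getD 0 0 ∈ arr := by
                rw [← hperm.mem_iff]
                exact getD_mem heap 0 (List.length_pos_iff.mpr hhne)
              rw [harr] at hmem
              rcases List.mem_cons.mp hmem with h | h
              · exact le_of_eq h.symm
              · rw [harr] at hsort
                exact (List.pairwise_cons.mp hsort).1 _ h
            omega
          have htperm : (pyHeappop heap).2.Perm t := by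
            have hchain : ((pyHeappop heap).1 :: (pyHeappop heap).2).Perm (a :: t) := by
              refine pP.trans ?_
              rw [← harr]
              exact hperm
            rw [hva] at hchain
            exact hchain.cons_inv
          have htsort : List.Pairwise (· ≤ ·) t := by
            rw [harr] at hsort
            exact (List.pairwise_cons.mp hsort).2
          rw [hva]
          exact ih _ _ _ htperm htsort pH
      · rw [stepA, stepB, if_neg h0, if_neg h0, if_neg h1, if_neg h1]
        exact ih _ _ _ hperm hsort hheap

-- ===== VERDICT (by name: the statement is the Claim_ definition above) =====
theorem minHeap_spec : Claim_equal_minHeap := by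
  intro N Q _ _
  unfold Spec_minHeap minHeap minHeap_alt
  exact fold_rel Q [] [] [] (List.Perm.refl _) List.Pairwise.nil
    (by intro i h1 h2; simp at h2)
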